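-- pv_equiv track=rewrite | github.com/Zweitschoenster/KREIS_KREUZWORTRAETSEL_GUI | KREIS_WORTRAETSEL_V1.py | _rotate_vals_signed
-- ===== SOURCE A (Python) =====
-- def _rotate_cw(vals):
--     """
--     vals order: [UL, UR, LL, LR]
--     90° clockwise => [LL, UL, LR, UR]
--     """
--     return [vals[2], vals[0], vals[3], vals[1]]
--
-- def _rotate_ccw(vals):
--     """
--     vals order: [UL, UR, LL, LR]
--     90° counterclockwise => [UR, LR, UL, LL]
--     """
--     return [vals[1], vals[3], vals[0], vals[2]]
--
-- def _rotate_vals_signed(vals, steps_signed):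
--     v = list(vals)
--     s = int(steps_signed) % 4
--     if s == 0:
--         return v
--
--     if steps_signed > 0:
--         for _ in range(s):
--             v = _rotate_cw(v)
--     else:
--         for _ in range(s):
--             v = _rotate_ccw(v)
--     return v
-- ===== SOURCE B (Python) =====
-- _PERMS = {1: (2, 0, 3, 1), 2: (3, 2, 1, 0), 3: (1, 3, 0, 2)}
--
-- def _rotate_vals_signed(vals, steps_signed):
--     v = list(vals)
--     s = int(steps_signed) % 4
--     if s == 0:
--         return v
--     n = s if steps_signed > 0 else 4 - s
--     p = _PERMS[n]
--     return [v[p[0]], v[p[1]], v[p[2]], v[p[3]]]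
-- ===== Notes on version B (the rewrite author's own statement) =====
-- stated objective: simpler
-- what changed: B replaces A's iterated quarter-turn loop (applying _rotate_cw/_rotate_ccw s times) with a single lookup of a precomputed net-rotation permutation applied once.
import Mathlib
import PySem

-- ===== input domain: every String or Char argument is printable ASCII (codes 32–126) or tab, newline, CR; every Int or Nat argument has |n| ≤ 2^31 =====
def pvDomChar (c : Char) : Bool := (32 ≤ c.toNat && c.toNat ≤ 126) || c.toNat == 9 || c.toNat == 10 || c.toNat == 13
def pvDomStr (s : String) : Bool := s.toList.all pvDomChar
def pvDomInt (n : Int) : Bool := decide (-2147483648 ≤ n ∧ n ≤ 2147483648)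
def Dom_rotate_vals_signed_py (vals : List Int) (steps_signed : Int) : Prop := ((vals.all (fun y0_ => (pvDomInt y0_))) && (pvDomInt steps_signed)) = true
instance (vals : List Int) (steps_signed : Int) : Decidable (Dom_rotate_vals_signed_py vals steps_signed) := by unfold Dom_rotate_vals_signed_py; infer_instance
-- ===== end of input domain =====

-- B replaces A's iterated quarter-turn loop with a single precomputed permutation lookup; return-value equivalence on Pre_.

-- ===== PORT A =====
-- vals[2], vals[0], vals[3], vals[1]   (none = IndexError, excluded by Pre_)
def pvRotCw (v : List Int) : Option (List Int) :=
  match PySem.List.pyGet? v 2, PySem.List.pyGet? v 0, PySem.List.pyGet? v 3, PySem.List.pyGet? v 1 with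
  | some a, some b, some c, some d => some [a, b, c, d]
  | _, _, _, _ => none

-- vals[1], vals[3], vals[0], vals[2]
def pvRotCcw (v : List Int) : Option (List Int) :=
  match PySem.List.pyGet? v 1, PySem.List.pyGet? v 3, PySem.List.pyGet? v 0, PySem.List.pyGet? v 2 with
  | some a, some b, some c, some d => some [a, b, c, d]
  | _, _, _, _ => none

def rotate_vals_signed_py (vals : List Int) (steps_signed : Int) : List Int :=
  let v := vals
  let s := PySem.Int.mod steps_signed 4
  if s = 0 then v
  else
    let r :=
      if steps_signed > 0 then
        (List.range s.toNat).foldl (fun acc _ => acc.bind pvRotCw) (some v)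
      else
        (List.range s.toNat).foldl (fun acc _ => acc.bind pvRotCcw) (some v)
    r.getD []   -- never taken inside Pre_: all indexing succeeds there

-- ===== PORT B =====
def rotate_vals_signed_py_alt (vals : List Int) (steps_signed : Int) : List Int :=
  let v := vals
  let s := PySem.Int.mod steps_signed 4
  if s = 0 then v
  else
    let n := if steps_signed > 0 then s else 4 - s
    let p : Int × Int × Int × Int :=
      if n = 1 then (2, 0, 3, 1) else if n = 2 then (3, 2, 1, 0) else (1, 3, 0, 2)
    match PySem.List.pyGet? v p.1, PySem.List.pyGet? v p.2.1,
          PySem.List.pyGet? v p.2.2.1, PySem.List.pyGet? v p.2.2.2 with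
    | some a, some b, some c, some d => [a, b, c, d]
    | _, _, _, _ => []   -- never taken inside Pre_

-- ===== PRECONDITION & SPEC =====
-- Pre_ excludes exactly the inputs on which A raises IndexError: a net rotation (steps %% 4 ≠ 0) on a list shorter than 4.
def Pre_rotate_vals_signed_py (vals : List Int) (steps_signed : Int) : Prop :=
  PySem.Int.mod steps_signed 4 = 0 ∨ 4 ≤ vals.length
instance (vals : List Int) (steps_signed : Int) : Decidable (Pre_rotate_vals_signed_py vals steps_signed) := by unfold Pre_rotate_vals_signed_py; infer_instance

def pvWitness_rotate_vals_signed_py : List Int × Int := ([1, 2, 3, 4], -3)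

def Spec_rotate_vals_signed_py (vals : List Int) (steps_signed : Int) (out : List Int) : Prop := out = rotate_vals_signed_py_alt vals steps_signed
instance (vals : List Int) (steps_signed : Int) (out : List Int) : Decidable (Spec_rotate_vals_signed_py vals steps_signed out) := by unfold Spec_rotate_vals_signed_py; infer_instance

-- ===== CLAIM (what is proved, stated in full; the proofs are below) =====
def Claim_equal_rotate_vals_signed_py : Prop := ∀ (vals : List Int) (steps_signed : Int), Dom_rotate_vals_signed_py vals steps_signed → Pre_rotate_vals_signed_py vals steps_signed → Spec_rotate_vals_signed_py vals steps_signed (rotate_vals_signed_py vals steps_signed)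

-- ===== LEMMAS AND PROOFS =====
theorem pv_mod_emod (x : Int) : PySem.Int.mod x 4 = x % 4 :=
  PySem.Int.mod_eq_emod_of_pos (by norm_num)

theorem pv_get0 (a b c d : Int) (t : List Int) : PySem.List.pyGet? (a::b::c::d::t) 0 = some a := by
  rw [show (0:Int) = ((0:Nat):Int) by norm_num, PySem.List.pyGet?_natCast]; rfl
theorem pv_get1 (a b c d : Int) (t : List Int) : PySem.List.pyGet? (a::b::c::d::t) 1 = some b := by
  rw [show (1:Int) = ((1:Nat):Int) by norm_num, PySem.List.pyGet?_natCast]; rfl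
theorem pv_get2 (a b c d : Int) (t : List Int) : PySem.List.pyGet? (a::b::c::d::t) 2 = some c := by
  rw [show (2:Int) = ((2:Nat):Int) by norm_num, PySem.List.pyGet?_natCast]; rfl
theorem pv_get3 (a b c d : Int) (t : List Int) : PySem.List.pyGet? (a::b::c::d::t) 3 = some d := by
  rw [show (3:Int) = ((3:Nat):Int) by norm_num, PySem.List.pyGet?_natCast]; rfl

theorem pv_main (vals : List Int) (steps_signed : Int)
    (hp : Pre_rotate_vals_signed_py vals steps_signed) :
    rotate_vals_signed_py vals steps_signed = rotate_vals_signed_py_alt vals steps_signed := by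
  have hm := pv_mod_emod steps_signed
  by_cases hz : steps_signed % 4 = 0
  · simp [rotate_vals_signed_py, rotate_vals_signed_py_alt, hz]
  · have hlen : 4 ≤ vals.length := by
      rcases hp with h | h
      · exact absurd (by omega : steps_signed % 4 = 0) hz
      · exact h
    obtain ⟨a, b, c, d, t, rfl⟩ :
        ∃ a b c d t, vals = a :: b :: c :: d :: t := by
      match vals, hlen with
      | a :: b :: c :: d :: t, _ => exact ⟨a, b, c, d, t, rfl⟩
    have hs : steps_signed % 4 = 1 ∨ steps_signed % 4 = 2 ∨ steps_signed % 4 = 3 := by omega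
    by_cases hpos : steps_signed > 0 <;>
      rcases hs with h | h | h <;>
      · simp only [rotate_vals_signed_py, rotate_vals_signed_py_alt, hm, h, hpos]
        norm_num [pvRotCw, pvRotCcw, pv_get0, pv_get1, pv_get2, pv_get3, show Int.toNat 1 = 1 from rfl, show Int.toNat 2 = 2 from rfl, show Int.toNat 3 = 3 from rfl, List.range_succ]

-- ===== VERDICT (by name: the statement is the Claim_ definition above) =====
theorem rotate_vals_signed_py_spec : Claim_equal_rotate_vals_signed_py := by
  intro vals steps_signed _ hp
  exact pv_main vals steps_signed hp
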